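-- pv_equiv track=rewrite | github.com/dylanhross/dmccs | initial_processing/dmim_analysis/util.py | remove_counter_ions
-- ===== SOURCE A (Python) =====
-- def remove_counter_ions(name, separator=' '):
--     """
-- remove_counter_ions
--     description:
--         removes unwanted counter ions (and other extras) from a compound name
--     parameters:
--         name (str) -- compound name
--     returns:
--         (str) -- compound name with counter ions removed
-- """
--     # counter ions to remove from compound names
--     counter_ions = [
--         'MALEATE', 'SULFATE', 'HEMISULFATE', 'FUMARATE', 'POTASSIUM', 'SODIUM', 'CITRATE', 'MESYLATE', 'SALICYLATE',
--         'PHOSPHATE', 'CALCIUM', 'BROMIDE', 'HYDROBROMIDE', 'HYDROCHLORIDE', 'TARTRATE', 'SUCCINATE', 'HYDRATE',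
--         'NITRATE', 'IODIDE', 'CHLORIDE', 'SALT', '(+/-)', '(D[+])', '[t(-)]', '(dl)'
--     ]
--     # check for removable counter ions
--     for counter_ion in counter_ions:
--         if counter_ion in name.split(separator):
--             trimmed = name.split(separator)
--             trimmed.remove(counter_ion)
--             name = separator.join(trimmed)
--     return name
-- ===== SOURCE B (Python) =====
-- def remove_counter_ions(name, separator=' '):
--     """
-- remove_counter_ions
--     description:
--         removes unwanted counter ions (and other extras) from a compound name
--     parameters:
--         name (str) -- compound name
--     returns:
--         (str) -- compound name with counter ions removed
-- """
--     counter_ions = [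
--         'MALEATE', 'SULFATE', 'HEMISULFATE', 'FUMARATE', 'POTASSIUM', 'SODIUM', 'CITRATE', 'MESYLATE', 'SALICYLATE',
--         'PHOSPHATE', 'CALCIUM', 'BROMIDE', 'HYDROBROMIDE', 'HYDROCHLORIDE', 'TARTRATE', 'SUCCINATE', 'HYDRATE',
--         'NITRATE', 'IODIDE', 'CHLORIDE', 'SALT', '(+/-)', '(D[+])', '[t(-)]', '(dl)'
--     ]
--     # single pass over the tokens: drop the FIRST occurrence of each counter-ion token
--     remaining = set(counter_ions)
--     kept = []
--     for token in name.split(separator):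
--         if token in remaining:
--             remaining.discard(token)
--         else:
--             kept.append(token)
--     return separator.join(kept)
-- ===== Notes on version B (the rewrite author's own statement) =====
-- stated objective: faster
-- what changed: B splits the name once and makes a single left-to-right pass over the tokens with a shrinking set of still-removable counter ions, instead of A's per-ion re-split/membership-scan/remove/re-join passes over the whole name.
import Mathlib
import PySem

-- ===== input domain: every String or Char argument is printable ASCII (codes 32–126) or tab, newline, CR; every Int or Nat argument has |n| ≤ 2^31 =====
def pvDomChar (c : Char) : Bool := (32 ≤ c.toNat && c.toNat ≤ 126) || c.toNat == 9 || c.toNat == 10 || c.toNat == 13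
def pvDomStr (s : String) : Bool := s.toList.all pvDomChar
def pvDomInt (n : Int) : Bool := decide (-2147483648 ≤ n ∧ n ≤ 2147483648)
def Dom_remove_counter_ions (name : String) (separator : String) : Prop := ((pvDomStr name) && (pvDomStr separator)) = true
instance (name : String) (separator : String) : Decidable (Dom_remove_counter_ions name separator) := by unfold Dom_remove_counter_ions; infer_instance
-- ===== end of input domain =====

-- B splits the name once and removes each counter-ion token in a single pass with a shrinking
-- set, instead of A's per-ion re-split / scan / remove / re-join passes (objective: faster,
-- constant-factor: one tokenisation instead of up to 25).

-- the literal counter-ion list both Pythons contain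
def counterIons : List String :=
  ["MALEATE", "SULFATE", "HEMISULFATE", "FUMARATE", "POTASSIUM", "SODIUM", "CITRATE", "MESYLATE", "SALICYLATE",
   "PHOSPHATE", "CALCIUM", "BROMIDE", "HYDROBROMIDE", "HYDROCHLORIDE", "TARTRATE", "SUCCINATE", "HYDRATE",
   "NITRATE", "IODIDE", "CHLORIDE", "SALT", "(+/-)", "(D[+])", "[t(-)]", "(dl)"]

-- ===== PORT A =====
-- for-loop over counter_ions; each iteration re-splits the current name, tests membership,
-- removes the first occurrence and re-joins.  splitting by an empty separator raises ValueError in Python: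
-- split? returns none there (excluded by Pre_), the accumulator is left unchanged.
def remove_counter_ions (name : String) (separator : String) : String :=
  counterIons.foldl (fun nm ci =>
    match PySem.Str.split? nm separator with
    | none => nm
    | some parts =>
      if ci ∈ parts then
        match PySem.List.remove? parts ci with
        | some trimmed => PySem.Str.join separator trimmed
        | none => nm
      else nm) name

-- ===== PORT B =====
-- single pass over the token list, 'remaining' is the Python set of still-removable ions
def removePass (remaining : PySem.Set String) : List String → List String
  | [] => []
  | t :: rest =>
    if PySem.Set.contains remaining t then removePass (PySem.Set.discard remaining t) rest
    else t :: removePass remaining rest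

def remove_counter_ions_alt (name : String) (separator : String) : String :=
  match PySem.Str.split? name separator with
  | none => name   -- empty separator: Python B raises ValueError too (excluded by Pre_)
  | some tokens => PySem.Str.join separator (removePass (PySem.Set.ofList counterIons) tokens)

-- ===== PRECONDITION & SPEC =====
-- Pre_ excludes only an empty separator string, on which both Pythons raise ValueError
def Pre_remove_counter_ions (name : String) (separator : String) : Prop := separator ≠ ""
instance (name : String) (separator : String) : Decidable (Pre_remove_counter_ions name separator) := by unfold Pre_remove_counter_ions; infer_instance

def pvWitness_remove_counter_ions : String × String := ("ATORVASTATIN CALCIUM", " ")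

def Spec_remove_counter_ions (name : String) (separator : String) (out : String) : Prop := out = remove_counter_ions_alt name separator
instance (name : String) (separator : String) (out : String) : Decidable (Spec_remove_counter_ions name separator out) := by unfold Spec_remove_counter_ions; infer_instance

-- ===== CLAIM (what is proved, stated in full; the proofs are below) =====
def Claim_equal_remove_counter_ions : Prop := ∀ (name : String) (separator : String), Dom_remove_counter_ions name separator → Pre_remove_counter_ions name separator → Spec_remove_counter_ions name separator (remove_counter_ions name separator)

-- ===== LEMMAS AND PROOFS =====

-- ---- a clean structural-recursion version of PySem.Chars.splitOn (proved equal below) ----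
def sOn (sep : List Char) : List Char → List (List Char)
  | [] => [[]]
  | c :: rest =>
    if h : sep ≠ [] ∧ sep.isPrefixOf (c :: rest) then
      [] :: sOn sep ((c :: rest).drop sep.length)
    else
      (sOn sep rest).modifyHead (c :: ·)
termination_by l => l.length
decreasing_by
  · have hs : 1 ≤ sep.length := by
      cases sep with
      | nil => exact absurd rfl h.1
      | cons a b => simp
    simp only [List.length_drop, List.length_cons]
    omega
  · simp

theorem sOn_nil (sep : List Char) : sOn sep [] = [[]] := by
  rw [sOn]

theorem sOn_cons_pos (sep : List Char) (c : Char) (rest : List Char)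
    (h : sep ≠ [] ∧ sep.isPrefixOf (c :: rest)) :
    sOn sep (c :: rest) = [] :: sOn sep ((c :: rest).drop sep.length) := by
  rw [sOn, dif_pos h]

theorem sOn_cons_neg (sep : List Char) (c : Char) (rest : List Char)
    (h : ¬ (sep ≠ [] ∧ sep.isPrefixOf (c :: rest))) :
    sOn sep (c :: rest) = (sOn sep rest).modifyHead (c :: ·) := by
  rw [sOn, dif_neg h]

theorem sOn_ne_nil (sep l : List Char) : sOn sep l ≠ [] := by
  induction l using sOn.induct sep with
  | case1 => simp [sOn_nil]
  | case2 c rest h ih => rw [sOn_cons_pos sep c rest h]; simp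
  | case3 c rest h ih =>
    rw [sOn_cons_neg sep c rest h]
    cases hx : sOn sep rest with
    | nil => exact absurd hx ih
    | cons a as => simp

theorem sep_len_pos (sep : List Char) (hsep : sep ≠ []) : 1 ≤ sep.length := by
  cases sep with
  | nil => exact absurd rfl hsep
  | cons a b => simp

theorem go_eq (sep : List Char) (hsep : sep ≠ []) :
    ∀ fuel l cur acc, l.length < fuel →
      PySem.Chars.splitOn.go sep fuel l cur acc
        = acc.reverse ++ (sOn sep l).modifyHead (fun t => cur.reverse ++ t) := by
  intro fuel
  induction fuel with
  | zero => intro l cur acc h; simp at h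
  | succ f ih =>
    intro l cur acc h
    cases l with
    | nil =>
      rw [PySem.Chars.splitOn.go.eq_def]
      simp [sOn_nil]
    | cons c rest =>
      rw [PySem.Chars.splitOn.go.eq_def]
      by_cases hp : sep.isPrefixOf (c :: rest)
      · simp only [hp, if_true]
        have hlt : (List.drop sep.length (c :: rest)).length < f := by
          have := sep_len_pos sep hsep
          simp only [List.length_drop, List.length_cons] at *
          omega
        rw [ih _ _ _ hlt, sOn_cons_pos sep c rest ⟨hsep, hp⟩]
        cases hx : sOn sep ((c :: rest).drop sep.length) with
        | nil => exact absurd hx (sOn_ne_nil sep _)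
        | cons a as => simp
      · simp only [hp]
        have hlt : rest.length < f := by
          simp only [List.length_cons] at h; omega
        rw [ih _ _ _ hlt, sOn_cons_neg sep c rest (by intro hc; exact hp hc.2)]
        cases hx : sOn sep rest with
        | nil => exact absurd hx (sOn_ne_nil sep _)
        | cons a as => simp

theorem splitOn_eq_sOn (sep l : List Char) (hsep : sep ≠ []) :
    PySem.Chars.splitOn l sep = sOn sep l := by
  unfold PySem.Chars.splitOn
  rw [go_eq sep hsep (l.length + 1) l [] [] (by omega)]
  cases hx : sOn sep l with
  | nil => exact absurd hx (sOn_ne_nil sep _)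
  | cons a as => simp

theorem join_cons (sep a : List Char) (ts : List (List Char)) (h : ts ≠ []) :
    PySem.Chars.join sep (a :: ts) = a ++ sep ++ PySem.Chars.join sep ts := by
  cases ts with
  | nil => exact absurd rfl h
  | cons b t => rw [PySem.Chars.join_cons_cons]

theorem join_sOn (sep l : List Char) (hsep : sep ≠ []) :
    PySem.Chars.join sep (sOn sep l) = l := by
  induction l using sOn.induct sep with
  | case1 => rw [sOn_nil, PySem.Chars.join_singleton]
  | case2 c rest h ih =>
    rw [sOn_cons_pos sep c rest h, join_cons sep [] _ (sOn_ne_nil sep _), ih]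
    simp only [List.nil_append]
    have hp : sep <+: (c :: rest) := List.isPrefixOf_iff_prefix.mp h.2
    obtain ⟨t, ht⟩ := hp
    rw [← ht]
    simp
  | case3 c rest h ih =>
    rw [sOn_cons_neg sep c rest h]
    cases hx : sOn sep rest with
    | nil => exact absurd hx (sOn_ne_nil sep _)
    | cons a as =>
      rw [hx] at ih
      cases as with
      | nil =>
        simp only [List.modifyHead, PySem.Chars.join_singleton] at *
        rw [ih]
      | cons b bs =>
        simp only [List.modifyHead]
        rw [join_cons sep _ _ (by simp : (b :: bs : List (List Char)) ≠ [])] at ih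
        rw [join_cons sep _ _ (by simp : (b :: bs : List (List Char)) ≠ [])]
        rw [← ih]
        simp

-- token conditions: OkTok = the separator matches at no position strictly inside the token
-- (even allowing the match to run into the separator that follows the token)
def OkTok (sep t : List Char) : Prop := ∀ v, v ≠ [] → v <:+ t → ¬ sep <+: (v ++ sep)

def GoodT (sep : List Char) : List (List Char) → Prop
  | [] => True
  | [t] => ¬ sep <:+: t
  | t :: ts => OkTok sep t ∧ GoodT sep ts

theorem okTok_not_infix (sep t : List Char) (hsep : sep ≠ []) (h : OkTok sep t) : ¬ sep <:+: t := by
  intro hinf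
  obtain ⟨u, hpu, hut⟩ := List.infix_iff_prefix_suffix.mp hinf
  have hu : u ≠ [] := by
    intro he; rw [he] at hpu; exact hsep (List.prefix_nil.mp hpu)
  exact h u hu hut (hpu.trans (List.prefix_append u sep))

theorem sOn_no_infix (sep l : List Char) (h : ¬ sep <:+: l) : sOn sep l = [l] := by
  induction l using sOn.induct sep with
  | case1 => exact sOn_nil sep
  | case2 c rest hc ih =>
    exact absurd (List.isPrefixOf_iff_prefix.mp hc.2).isInfix h
  | case3 c rest hc ih =>
    rw [sOn_cons_neg sep c rest hc, ih (fun hi => h (hi.trans (List.suffix_cons c rest).isInfix))]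
    rfl

theorem prefix_append_of_le (sep A X : List Char) (hle : sep.length ≤ A.length) :
    sep <+: (A ++ X) ↔ sep <+: A := by
  constructor
  · intro hp
    have := List.prefix_take_iff.mpr ⟨hp, le_rfl⟩
    rw [List.take_append_of_le_length hle] at this
    exact this.trans (List.take_prefix _ _)
  · intro hp; exact hp.trans (List.prefix_append A X)

theorem sOn_append_sep (sep : List Char) (hsep : sep ≠ []) :
    ∀ (t X : List Char), OkTok sep t → sOn sep (t ++ sep ++ X) = t :: sOn sep X := by
  intro t
  induction t with
  | nil =>
    intro X _
    cases hsp : sep with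
    | nil => exact absurd hsp hsep
    | cons s0 s' =>
      subst hsp
      have h1 : ([] : List Char) ++ (s0 :: s') ++ X = s0 :: (s' ++ X) := by simp
      have h2 : s0 :: (s' ++ X) = (s0 :: s') ++ X := by simp
      rw [h1, sOn_cons_pos _ s0 (s' ++ X)
        ⟨by simp, List.isPrefixOf_iff_prefix.mpr (by rw [h2]; exact List.prefix_append _ _)⟩]
      congr 1
      rw [h2, List.drop_left]
  | cons c t' ih =>
    intro X hok
    have hsplit : (c :: t') ++ sep ++ X = c :: (t' ++ sep ++ X) := by simp
    have hnp : ¬ sep.isPrefixOf (c :: (t' ++ sep ++ X)) := by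
      rw [List.isPrefixOf_iff_prefix]
      intro hp
      have hp' : sep <+: ((c :: t') ++ sep) ++ X := by simpa using hp
      rw [prefix_append_of_le sep _ X (by simp; omega)] at hp'
      exact hok (c :: t') (by simp) List.suffix_rfl hp'
    rw [hsplit, sOn_cons_neg sep c (t' ++ sep ++ X) (fun hc => hnp hc.2)]
    have hok' : OkTok sep t' := fun v hv hvt => hok v hv (hvt.trans (List.suffix_cons c t'))
    rw [ih X hok']
    rfl

theorem good_tail (sep : List Char) (t : List Char) (ts : List (List Char))
    (h : GoodT sep (t :: ts)) : GoodT sep ts := by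
  cases ts with
  | nil => trivial
  | cons b bs => exact h.2

theorem good_head_notinf (sep : List Char) (hsep : sep ≠ []) (t : List Char)
    (ts : List (List Char)) (h : GoodT sep (t :: ts)) : ¬ sep <:+: t := by
  cases ts with
  | nil => exact h
  | cons b bs => exact okTok_not_infix sep t hsep h.1

theorem good_cons (sep : List Char) (t : List Char) (ts : List (List Char))
    (hts : GoodT sep ts) (h0 : ts = [] → ¬ sep <:+: t) (h1 : ts ≠ [] → OkTok sep t) :
    GoodT sep (t :: ts) := by
  cases ts with
  | nil => exact h0 rfl
  | cons b bs => exact ⟨h1 (by simp), hts⟩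

theorem good_sOn (sep l : List Char) (hsep : sep ≠ []) : GoodT sep (sOn sep l) := by
  induction l using sOn.induct sep with
  | case1 =>
    rw [sOn_nil]
    intro hinf
    exact hsep (List.infix_nil.mp hinf)
  | case2 c rest hc ih =>
    rw [sOn_cons_pos sep c rest hc]
    refine good_cons sep [] _ ih (fun he => absurd he (sOn_ne_nil sep _)) ?_
    intro _ v hv hvt
    rw [List.suffix_nil.mp hvt] at hv
    exact absurd rfl hv
  | case3 c rest hc ih =>
    rw [sOn_cons_neg sep c rest hc]
    have hnp : ¬ sep.isPrefixOf (c :: rest) := fun hp => hc ⟨hsep, hp⟩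
    rw [List.isPrefixOf_iff_prefix] at hnp
    cases hx : sOn sep rest with
    | nil => exact absurd hx (sOn_ne_nil sep _)
    | cons a as =>
      rw [hx] at ih
      have hrest : PySem.Chars.join sep (a :: as) = rest := by
        rw [← hx]; exact join_sOn sep rest hsep
      simp only [List.modifyHead]
      cases as with
      | nil =>
        rw [PySem.Chars.join_singleton] at hrest
        subst hrest
        intro hinf
        rcases List.infix_cons_iff.mp hinf with hp | hi
        · exact hnp hp
        · exact ih hi
      | cons b bs =>
        refine ⟨?_, ih.2⟩
        intro v hv hvt
        rcases List.suffix_cons_iff.mp hvt with he | hvt'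
        · subst he
          intro hp
          rw [join_cons sep a (b :: bs) (by simp)] at hrest
          have hre : c :: rest = ((c :: a) ++ sep) ++ PySem.Chars.join sep (b :: bs) := by
            rw [← hrest]; simp
          exact hnp (by rw [hre, prefix_append_of_le sep _ _ (by simp; omega)]; exact hp)
        · exact ih.1 v hv hvt'

theorem join_good (sep : List Char) (hsep : sep ≠ []) :
    ∀ ts, GoodT sep ts → ts ≠ [] → sOn sep (PySem.Chars.join sep ts) = ts := by
  intro ts
  induction ts with
  | nil => intro _ h; exact absurd rfl h
  | cons t ts ih =>
    intro hg _
    cases ts with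
    | nil =>
      rw [PySem.Chars.join_singleton]
      exact sOn_no_infix sep t hg
    | cons b bs =>
      rw [join_cons sep t (b :: bs) (by simp),
          sOn_append_sep sep hsep t _ hg.1,
          ih hg.2 (by simp)]

theorem good_erase (sep : List Char) (hsep : sep ≠ []) (x : List Char) :
    ∀ ts, GoodT sep ts → GoodT sep (ts.erase x) := by
  intro ts
  induction ts with
  | nil => intro _; trivial
  | cons t ts ih =>
    intro hg
    by_cases he : t = x
    · rw [he, List.erase_cons_head]
      exact good_tail sep x ts (he ▸ hg)
    · rw [List.erase_cons_tail (by simp [he])]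
      refine good_cons sep t _ (ih (good_tail sep t ts hg)) ?_ ?_
      · intro _; exact good_head_notinf sep hsep t ts hg
      · intro hne
        have hts : ts ≠ [] := by
          intro h0; rw [h0] at hne; exact hne rfl
        cases ts with
        | nil => exact absurd rfl hts
        | cons b bs => exact fun v hv hvt => hg.1 v hv hvt

-- ---- generic: first-occurrence-erase fold, and B's pass computes it ----
def eraseFold (ts L : List String) : List String := L.foldl (fun l x => l.erase x) ts

theorem eraseFold_nil (L : List String) : eraseFold [] L = [] := by
  induction L with
  | nil => rfl
  | cons c L' ih => simpa [eraseFold, List.foldl_cons] using ih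

theorem eraseFold_cons (t : String) (r L : List String) :
    eraseFold (t :: r) L = if t ∈ L then eraseFold r (L.erase t) else t :: eraseFold r L := by
  induction L generalizing r with
  | nil => simp [eraseFold]
  | cons c L' ih =>
    by_cases hct : c = t
    · subst hct
      simp only [eraseFold, List.foldl_cons, List.erase_cons_head, List.mem_cons, true_or,
        if_true]
    · have h1 : (t :: r).erase c = t :: r.erase c := by
        rw [List.erase_cons_tail (by simp [Ne.symm hct])]
      have h2 : eraseFold (t :: r) (c :: L') = eraseFold (t :: r.erase c) L' := by
        simp [eraseFold, List.foldl_cons, h1]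
      rw [h2, ih (r.erase c)]
      by_cases ht : t ∈ L'
      · have h3 : (c :: L').erase t = c :: L'.erase t := by
          rw [List.erase_cons_tail (by simp [hct])]
        simp only [ht, if_true, List.mem_cons, or_true, h3]
        rfl
      · have ht' : t ∉ c :: L' := by simp [ht, Ne.symm hct]
        simp only [ht, if_false, ht', if_false]
        rfl

theorem discard_eq_erase (S : List String) (t : String) (hn : S.Nodup) :
    PySem.Set.discard S t = S.erase t := by
  unfold PySem.Set.discard
  rw [hn.erase_eq_filter]
  congr 1

theorem removePass_eq (ts : List String) : ∀ S, S.Nodup → removePass S ts = eraseFold ts S := by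
  induction ts with
  | nil => intro S _; rw [eraseFold_nil]; rfl
  | cons t rest ih =>
    intro S hn
    rw [eraseFold_cons]
    by_cases hm : t ∈ S
    · rw [removePass, if_pos ((PySem.Set.contains_iff S t).mpr hm), if_pos hm,
        ih _ (PySem.Set.nodup_discard S t hn), discard_eq_erase S t hn]
    · rw [removePass, if_neg (by rw [PySem.Set.contains_iff]; exact hm), if_neg hm,
        ih _ hn]

-- ---- Str-level bridges ----
def GoodS (sep : String) (ts : List String) : Prop := GoodT sep.toList (ts.map String.toList)

theorem toList_ne_nil (s : String) (h : s ≠ "") : s.toList ≠ [] := by simp [h]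

theorem chars_split?_eq (s sep : List Char) (hsep : sep ≠ []) :
    PySem.Chars.split? s sep = some (sOn sep s) := by
  unfold PySem.Chars.split?
  rw [if_neg (by simp [hsep]), splitOn_eq_sOn sep s hsep]

theorem str_split?_some (s sep : String) (ts : List String) (hsep : sep ≠ "")
    (h : sOn sep.toList s.toList = ts.map String.toList) :
    PySem.Str.split? s sep = some ts := by
  have hm := PySem.Str.split?_map s sep
  rw [chars_split?_eq s.toList sep.toList (toList_ne_nil sep hsep), h] at hm
  cases hx : PySem.Str.split? s sep with
  | none => rw [hx] at hm; simp at hm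
  | some us =>
    rw [hx] at hm
    simp only [Option.map_some, Option.some.injEq] at hm
    have : us = ts := by
      have hinj : Function.Injective String.toList := fun a b hab => String.toList_inj.mp hab
      exact List.map_injective_iff.mpr hinj hm
    rw [this]

theorem split?_join (sep : String) (ts : List String) (hsep : sep ≠ "")
    (hg : GoodS sep ts) (hne : ts ≠ []) :
    PySem.Str.split? (PySem.Str.join sep ts) sep = some ts := by
  refine str_split?_some _ sep ts hsep ?_
  rw [PySem.Str.toList_join]
  exact join_good sep.toList (toList_ne_nil sep hsep) (ts.map String.toList) hg
    (by simp [hne])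

theorem goodS_erase (sep : String) (hsep : sep ≠ "") (x : String) (ts : List String)
    (h : GoodS sep ts) : GoodS sep (ts.erase x) := by
  unfold GoodS at *
  rw [List.map_erase (fun a b hab => String.toList_inj.mp hab)]
  exact good_erase sep.toList (toList_ne_nil sep hsep) x.toList (ts.map String.toList) h

theorem join_empty (sep : String) : PySem.Str.join sep [] = "" := rfl

theorem split?_empty (sep : String) (hsep : sep ≠ "") :
    PySem.Str.split? "" sep = some [""] := by
  refine str_split?_some "" sep [""] hsep ?_
  simp [sOn_nil]

theorem remove?_of_mem (parts : List String) (ci : String) (h : ci ∈ parts) :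
    PySem.List.remove? parts ci = some (parts.erase ci) := by
  unfold PySem.List.remove?
  rw [List.erase_eq_eraseIdx]
  cases hx : List.idxOf? ci parts with
  | none => exact absurd h (by simpa using List.idxOf?_eq_none_iff.mp hx)
  | some i => simp

-- A's loop body, named for the proofs (identical to the lambda in the port of A)
def stepA (sep : String) : String → String → String := fun nm ci =>
  match PySem.Str.split? nm sep with
  | none => nm
  | some parts =>
    if ci ∈ parts then
      match PySem.List.remove? parts ci with
      | some trimmed => PySem.Str.join sep trimmed
      | none => nm
    else nm

theorem stepA_empty (sep : String) (hsep : sep ≠ "") (ci : String) (hci : ci ≠ "") :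
    stepA sep (PySem.Str.join sep []) ci = PySem.Str.join sep [] := by
  rw [join_empty]
  unfold stepA
  rw [split?_empty sep hsep]
  have : ci ∉ ([""] : List String) := by simp [hci]
  simp only [this, if_false]

theorem stepA_good (sep : String) (hsep : sep ≠ "") (ci : String) (ts : List String)
    (hg : GoodS sep ts) (hne : ts ≠ []) :
    stepA sep (PySem.Str.join sep ts) ci = PySem.Str.join sep (ts.erase ci) := by
  unfold stepA
  rw [split?_join sep ts hsep hg hne]
  by_cases hm : ci ∈ ts
  · simp only [hm, if_true, remove?_of_mem ts ci hm]
  · simp only [hm, if_false, List.erase_of_not_mem hm]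

-- A's fold over the ions, tracked on the token list
theorem foldA_eq (sep : String) (hsep : sep ≠ "") :
    ∀ (ions : List String), (∀ ci ∈ ions, ci ≠ "") →
    ∀ ts : List String, (ts = [] ∨ (GoodS sep ts ∧ ts ≠ [])) →
      ions.foldl (stepA sep) (PySem.Str.join sep ts)
      = PySem.Str.join sep (eraseFold ts ions) := by
  intro ions
  induction ions with
  | nil => intro _ ts _; rfl
  | cons ci ions ih =>
    intro hci ts hts
    rw [List.foldl_cons]
    have hci' : ∀ c ∈ ions, c ≠ "" := fun c hc => hci c (List.mem_cons_of_mem ci hc)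
    rcases hts with h0 | ⟨hg, hne⟩
    · subst h0
      rw [stepA_empty sep hsep ci (hci ci List.mem_cons_self),
          ih hci' [] (Or.inl rfl)]
      show PySem.Str.join sep (eraseFold [] ions) = PySem.Str.join sep (eraseFold ([].erase ci) ions)
      rw [List.erase_nil]
    · rw [stepA_good sep hsep ci ts hg hne]
      have hcase : ts.erase ci = [] ∨ (GoodS sep (ts.erase ci) ∧ ts.erase ci ≠ []) := by
        by_cases he : ts.erase ci = []
        · exact Or.inl he
        · exact Or.inr ⟨goodS_erase sep hsep ci ts hg, he⟩
      rw [ih hci' (ts.erase ci) hcase]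
      rfl

theorem counterIons_nodup : counterIons.Nodup := by decide

theorem counterIons_ne_empty : ∀ ci ∈ counterIons, ci ≠ "" := by decide

-- ===== VERDICT (by name: the statement is the Claim_ definition above) =====
theorem remove_counter_ions_spec : Claim_equal_remove_counter_ions := by
  unfold Claim_equal_remove_counter_ions
  intro name sep _ hpre
  unfold Pre_remove_counter_ions at hpre
  unfold Spec_remove_counter_ions remove_counter_ions remove_counter_ions_alt
  have hsepl : sep.toList ≠ [] := toList_ne_nil sep hpre
  -- the one token list both programs work on
  set ts0 : List String := (sOn sep.toList name.toList).map String.ofList with hts0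
  have hmap : ts0.map String.toList = sOn sep.toList name.toList := by
    rw [hts0, List.map_map]
    simp [Function.comp_def, String.toList_ofList]
  have hsplit : PySem.Str.split? name sep = some ts0 :=
    str_split?_some name sep ts0 hpre hmap.symm
  have hgood : GoodS sep ts0 := by
    unfold GoodS
    rw [hmap]
    exact good_sOn sep.toList name.toList hsepl
  have hne : ts0 ≠ [] := by
    intro h
    apply sOn_ne_nil sep.toList name.toList
    rw [← hmap, h, List.map_nil]
  have hjoin : PySem.Str.join sep ts0 = name := by
    apply String.toList_inj.mp
    rw [PySem.Str.toList_join, hmap]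
    exact join_sOn sep.toList name.toList hsepl
  rw [hsplit]
  show counterIons.foldl (stepA sep) name
      = PySem.Str.join sep (removePass (PySem.Set.ofList counterIons) ts0)
  rw [removePass_eq ts0 (PySem.Set.ofList counterIons) (PySem.Set.nodup_ofList counterIons),
      PySem.Set.ofList_eq_self_of_nodup counterIons counterIons_nodup,
      ← hjoin]
  exact foldA_eq sep hpre counterIons counterIons_ne_empty ts0 (Or.inr ⟨hgood, hne⟩)
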